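-- pv_equiv track=rewrite | github.com/rgoerwit/ai-investment-agent | src/agents/support.py | extract_news_highlights
-- ===== SOURCE A (Python) =====
-- def extract_news_highlights(news_report: str, max_chars: int = 25000) -> str:
--     """Extract the small subset of news context used downstream."""
--     if not news_report or len(news_report) < 300:
--         return news_report
--
--     highlights = []
--     lines = news_report.split("\n")
--
--     in_geo_section = False
--     geo_lines = []
--     for line in lines:
--         line_upper = line.upper()
--         if "GEOGRAPHIC REVENUE" in line_upper or "US REVENUE" in line_upper:
--             in_geo_section = True
--             if ":" in line and not line.strip().startswith("###"):
--                 geo_lines.append(line)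
--         elif in_geo_section:
--             if line.startswith("---") or line.startswith("###"):
--                 in_geo_section = False
--             elif line.strip():
--                 geo_lines.append(line)
--                 if len(geo_lines) >= 6:
--                     break
--
--     if geo_lines:
--         highlights.append("**US/Geographic Revenue:**")
--         highlights.extend(geo_lines[:6])
--
--     in_catalyst_section = False
--     catalyst_header_added = False
--     catalyst_count = 0
--     for line in lines:
--         if "CATALYST" in line.upper() or "GROWTH CATALYST" in line.upper():
--             in_catalyst_section = True
--             if not catalyst_header_added:
--                 highlights.append("\n**Growth Catalysts:**")
--                 catalyst_header_added = True
--         elif in_catalyst_section: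
--             if line.startswith("---") or (
--                 line.startswith("###") and "CATALYST" not in line.upper()
--             ):
--                 in_catalyst_section = False
--             elif line.strip().startswith(("1.", "2.", "3.", "-", "*", "•")):
--                 highlights.append(line.strip()[:150])
--                 catalyst_count += 1
--                 if catalyst_count >= 3:
--                     break
--
--     result = "\n".join(highlights)
--     if len(result) > max_chars:
--         result = result[:max_chars] + "\n[...truncated for efficiency]"
--
--     return result if result.strip() else news_report[:max_chars]
-- ===== SOURCE B (Python) =====
-- def extract_news_highlights(news_report: str, max_chars: int = 25000) -> str:
--     """Single pass over the lines: both section state machines run together."""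
--     if not news_report or len(news_report) < 300:
--         return news_report
--
--     geo_lines = []
--     cat_lines = []          # header (if any) at index 0, then up to 3 entries
--     in_geo = False
--     in_cat = False
--     for line in news_report.split("\n"):
--         lu = line.upper()
--         # geographic-revenue machine (no cap here; truncated to 6 below)
--         if "GEOGRAPHIC REVENUE" in lu or "US REVENUE" in lu:
--             in_geo = True
--             if ":" in line and not line.strip().startswith("###"):
--                 geo_lines.append(line)
--         elif in_geo:
--             if line.startswith("---") or line.startswith("###"):
--                 in_geo = False
--             elif line.strip():
--                 geo_lines.append(line)
--         # growth-catalyst machine (frozen once 3 entries are collected)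
--         if "CATALYST" in lu:
--             in_cat = True
--             if not cat_lines:
--                 cat_lines.append("\n**Growth Catalysts:**")
--         elif in_cat:
--             if line.startswith("---") or (line.startswith("###") and "CATALYST" not in lu):
--                 in_cat = False
--             elif len(cat_lines) < 4 and line.strip().startswith(("1.", "2.", "3.", "-", "*", "•")):
--                 cat_lines.append(line.strip()[:150])
--
--     highlights = (["**US/Geographic Revenue:**"] + geo_lines[:6]) if geo_lines else []
--     highlights += cat_lines
--     result = "\n".join(highlights)
--     if len(result) > max_chars:
--         result = result[:max_chars] + "\n[...truncated for efficiency]"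
--     return result if result.strip() else news_report[:max_chars]
-- ===== Notes on version B (the rewrite author's own statement) =====
-- stated objective: alternative
-- what changed: B scans the line list once with both section state machines running together (the two breaks become a size-based freeze of the catalyst buffer and a post-hoc [:6] cut of the geo buffer), instead of A's two separate passes over the lines.
import Mathlib
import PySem

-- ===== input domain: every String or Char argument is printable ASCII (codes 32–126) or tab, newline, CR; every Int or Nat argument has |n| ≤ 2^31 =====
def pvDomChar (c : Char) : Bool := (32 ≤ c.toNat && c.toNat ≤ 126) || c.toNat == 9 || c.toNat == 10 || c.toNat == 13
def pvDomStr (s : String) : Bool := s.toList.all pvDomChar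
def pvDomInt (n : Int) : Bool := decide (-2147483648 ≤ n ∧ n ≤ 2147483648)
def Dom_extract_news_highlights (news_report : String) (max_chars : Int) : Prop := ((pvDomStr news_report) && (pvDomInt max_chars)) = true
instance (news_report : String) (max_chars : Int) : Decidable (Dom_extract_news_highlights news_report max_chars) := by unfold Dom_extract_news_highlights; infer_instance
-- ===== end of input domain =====

-- B rewrites A's two passes over the lines as ONE pass running both section
-- state machines together (the breaks become freeze conditions); same value.

-- ===== PORT A =====
-- per-line tests, named for readability; each is the exact Python expression
def pvA_geoTrig (line : String) : Bool :=
  PySem.Str.isIn "GEOGRAPHIC REVENUE" (PySem.Str.upper line) || PySem.Str.isIn "US REVENUE" (PySem.Str.upper line)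
def pvA_geoColon (line : String) : Bool :=
  PySem.Str.isIn ":" line && !(PySem.Str.startswith (PySem.Str.strip line) "###")
def pvA_geoEnd (line : String) : Bool :=
  PySem.Str.startswith line "---" || PySem.Str.startswith line "###"
def pvA_catTrig (line : String) : Bool :=
  PySem.Str.isIn "CATALYST" (PySem.Str.upper line) || PySem.Str.isIn "GROWTH CATALYST" (PySem.Str.upper line)
def pvA_catEnd (line : String) : Bool :=
  PySem.Str.startswith line "---" ||
    (PySem.Str.startswith line "###" && !(PySem.Str.isIn "CATALYST" (PySem.Str.upper line)))
def pvA_bullet (line : String) : Bool :=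
  PySem.Str.startswith (PySem.Str.strip line) "1." || PySem.Str.startswith (PySem.Str.strip line) "2." ||
    PySem.Str.startswith (PySem.Str.strip line) "3." || PySem.Str.startswith (PySem.Str.strip line) "-" ||
    PySem.Str.startswith (PySem.Str.strip line) "*" || PySem.Str.startswith (PySem.Str.strip line) "•"

-- A's first loop (geo section), with its break at len(geo_lines) >= 6
def pvA_geoLoop : List String → Bool → List String → List String
  | [], _, geo => geo
  | line :: rest, inGeo, geo =>
    if pvA_geoTrig line then
      pvA_geoLoop rest true (if pvA_geoColon line then geo ++ [line] else geo)
    else if inGeo then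
      if pvA_geoEnd line then pvA_geoLoop rest false geo
      else if !(PySem.Str.strip line == "") then
        if 6 ≤ (geo ++ [line]).length then geo ++ [line]
        else pvA_geoLoop rest inGeo (geo ++ [line])
      else pvA_geoLoop rest inGeo geo
    else pvA_geoLoop rest inGeo geo

-- A's second loop (catalysts), appending into highlights, break at count 3
def pvA_catLoop : List String → Bool → Bool → Nat → List String → List String
  | [], _, _, _, hs => hs
  | line :: rest, inCat, hAdded, cnt, hs =>
    if pvA_catTrig line then
      pvA_catLoop rest true true cnt (if hAdded then hs else hs ++ ["\n**Growth Catalysts:**"])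
    else if inCat then
      if pvA_catEnd line then pvA_catLoop rest false hAdded cnt hs
      else if pvA_bullet line then
        if 3 ≤ cnt + 1 then hs ++ [PySem.Str.slice (PySem.Str.strip line) none (some 150)]
        else pvA_catLoop rest inCat hAdded (cnt + 1)
          (hs ++ [PySem.Str.slice (PySem.Str.strip line) none (some 150)])
      else pvA_catLoop rest inCat hAdded cnt hs
    else pvA_catLoop rest inCat hAdded cnt hs

def extract_news_highlights (news_report : String) (max_chars : Int) : String :=
  if news_report == "" || PySem.Str.len news_report < 300 then news_report
  else
    -- sep "\n" is non-empty, so split? is always `some`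
    let lines := (PySem.Str.split? news_report "\n").getD []
    let geoLines := pvA_geoLoop lines false []
    let highlights :=
      if geoLines == [] then []
      else ["**US/Geographic Revenue:**"] ++ PySem.List.slice geoLines none (some 6)
    let highlights := pvA_catLoop lines false false 0 highlights
    let result := PySem.Str.join "\n" highlights
    let result :=
      if max_chars < PySem.Str.len result then
        PySem.Str.slice result none (some max_chars) ++ "\n[...truncated for efficiency]"
      else result
    if PySem.Str.strip result == "" then PySem.Str.slice news_report none (some max_chars)
    else result

-- ===== PORT B =====
-- one step of the fused single pass: both machines advance on the same line
def pvB_step : Bool × List String × Bool × List String → String → Bool × List String × Bool × List String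
  | (inGeo, geo, inCat, cat), line =>
    let lu := PySem.Str.upper line
    let gs :=
      if PySem.Str.isIn "GEOGRAPHIC REVENUE" lu || PySem.Str.isIn "US REVENUE" lu then
        (true,
          if PySem.Str.isIn ":" line && !(PySem.Str.startswith (PySem.Str.strip line) "###") then
            geo ++ [line]
          else geo)
      else if inGeo then
        if PySem.Str.startswith line "---" || PySem.Str.startswith line "###" then (false, geo)
        else if !(PySem.Str.strip line == "") then (inGeo, geo ++ [line])
        else (inGeo, geo)
      else (inGeo, geo)
    let cs :=
      if PySem.Str.isIn "CATALYST" lu then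
        (true, if cat == [] then cat ++ ["\n**Growth Catalysts:**"] else cat)
      else if inCat then
        if PySem.Str.startswith line "---" ||
            (PySem.Str.startswith line "###" && !(PySem.Str.isIn "CATALYST" lu)) then (false, cat)
        else if cat.length < 4 && pvA_bullet line then
          (inCat, cat ++ [PySem.Str.slice (PySem.Str.strip line) none (some 150)])
        else (inCat, cat)
      else (inCat, cat)
    (gs.1, gs.2, cs.1, cs.2)

def extract_news_highlights_alt (news_report : String) (max_chars : Int) : String :=
  if news_report == "" || PySem.Str.len news_report < 300 then news_report
  else
    -- sep "\n" is non-empty, so split? is always `some`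
    let lines := (PySem.Str.split? news_report "\n").getD []
    let st := lines.foldl pvB_step (false, [], false, [])
    let geoLines := st.2.1
    let catLines := st.2.2.2
    let highlights :=
      (if geoLines == [] then []
       else ["**US/Geographic Revenue:**"] ++ PySem.List.slice geoLines none (some 6)) ++ catLines
    let result := PySem.Str.join "\n" highlights
    let result :=
      if max_chars < PySem.Str.len result then
        PySem.Str.slice result none (some max_chars) ++ "\n[...truncated for efficiency]"
      else result
    if PySem.Str.strip result == "" then PySem.Str.slice news_report none (some max_chars)
    else result

-- ===== PRECONDITION & SPEC =====
def Spec_extract_news_highlights (news_report : String) (max_chars : Int) (out : String) : Prop := out = extract_news_highlights_alt news_report max_chars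
instance (news_report : String) (max_chars : Int) (out : String) : Decidable (Spec_extract_news_highlights news_report max_chars out) := by unfold Spec_extract_news_highlights; infer_instance

-- ===== CLAIM (what is proved, stated in full; the proofs are below) =====
def Claim_equal_extract_news_highlights : Prop := ∀ (news_report : String) (max_chars : Int), Dom_extract_news_highlights news_report max_chars → Spec_extract_news_highlights news_report max_chars (extract_news_highlights news_report max_chars)

-- ===== LEMMAS AND PROOFS =====

-- the two component machines of pvB_step, isolated for the proof
def pvGeoStep (line : String) (inGeo : Bool) (geo : List String) : Bool × List String :=
  if pvA_geoTrig line then (true, if pvA_geoColon line then geo ++ [line] else geo)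
  else if inGeo then
    if pvA_geoEnd line then (false, geo)
    else if !(PySem.Str.strip line == "") then (inGeo, geo ++ [line])
    else (inGeo, geo)
  else (inGeo, geo)

def pvCatStep (line : String) (inCat : Bool) (cat : List String) : Bool × List String :=
  if PySem.Str.isIn "CATALYST" (PySem.Str.upper line) then
    (true, if cat == [] then cat ++ ["\n**Growth Catalysts:**"] else cat)
  else if inCat then
    if pvA_catEnd line then (false, cat)
    else if cat.length < 4 && pvA_bullet line then
      (inCat, cat ++ [PySem.Str.slice (PySem.Str.strip line) none (some 150)])
    else (inCat, cat)
  else (inCat, cat)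

def pvGeoF : List String → Bool × List String → Bool × List String
  | [], st => st
  | line :: rest, st => pvGeoF rest (pvGeoStep line st.1 st.2)

def pvCatF : List String → Bool × List String → Bool × List String
  | [], st => st
  | line :: rest, st => pvCatF rest (pvCatStep line st.1 st.2)

theorem pvB_step_eq (g : Bool) (geo : List String) (c : Bool) (cat : List String) (line : String) :
    pvB_step (g, geo, c, cat) line =
      ((pvGeoStep line g geo).1, (pvGeoStep line g geo).2,
       (pvCatStep line c cat).1, (pvCatStep line c cat).2) := rfl

theorem pvA_catTrig_eq (line : String) :
    pvA_catTrig line = PySem.Str.isIn "CATALYST" (PySem.Str.upper line) := by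
  unfold pvA_catTrig
  cases h : PySem.Str.isIn "GROWTH CATALYST" (PySem.Str.upper line) with
  | false => simp
  | true =>
    have h2 : PySem.Str.isIn "CATALYST" (PySem.Str.upper line) = true := by
      rw [PySem.Str.isIn_iff_infix] at h ⊢
      exact List.IsInfix.trans (by decide) h
    rw [h2]; rfl

-- the fused fold is the two machines run independently
theorem pvFold_split (lines : List String) (g : Bool) (geo : List String)
    (c : Bool) (cat : List String) :
    lines.foldl pvB_step (g, geo, c, cat) =
      ((pvGeoF lines (g, geo)).1, (pvGeoF lines (g, geo)).2,
       (pvCatF lines (c, cat)).1, (pvCatF lines (c, cat)).2) := by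
  induction lines generalizing g geo c cat with
  | nil => simp [pvGeoF, pvCatF]
  | cons line rest ih =>
    rw [List.foldl_cons, pvB_step_eq, ih (pvGeoStep line g geo).1 (pvGeoStep line g geo).2
      (pvCatStep line c cat).1 (pvCatStep line c cat).2, pvGeoF, pvCatF]

-- each step only appends to the geo buffer
theorem pvGeoStep_ext (line : String) (g : Bool) (geo : List String) :
    ∃ u, (pvGeoStep line g geo).2 = geo ++ u := by
  unfold pvGeoStep
  split
  · split
    · exact ⟨[line], rfl⟩
    · exact ⟨[], by simp⟩
  · split
    · split
      · exact ⟨[], by simp⟩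
      · split
        · exact ⟨[line], rfl⟩
        · exact ⟨[], by simp⟩
    · exact ⟨[], by simp⟩

-- pvGeoF only appends to its buffer
theorem pvGeoF_ext (lines : List String) (g : Bool) (geo : List String) :
    ∃ t, (pvGeoF lines (g, geo)).2 = geo ++ t := by
  induction lines generalizing g geo with
  | nil => exact ⟨[], by simp [pvGeoF]⟩
  | cons line rest ih =>
    rw [pvGeoF]
    obtain ⟨u, hu⟩ := pvGeoStep_ext line g geo
    obtain ⟨t, ht⟩ := ih (pvGeoStep line g geo).1 (pvGeoStep line g geo).2
    refine ⟨u ++ t, ?_⟩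
    show (pvGeoF rest ((pvGeoStep line g geo).1, (pvGeoStep line g geo).2)).2 = geo ++ (u ++ t)
    rw [ht, hu, List.append_assoc]

-- once the catalyst buffer holds 4 strings nothing is ever appended again
theorem pvCatStep_frozen (line : String) (c : Bool) (cat : List String) (h : cat.length = 4) :
    (pvCatStep line c cat).2 = cat := by
  have hne : (cat == []) = false := by
    cases cat with
    | nil => simp at h
    | cons a l => rfl
  have hlt : (decide (cat.length < 4)) = false := by simp [h]
  unfold pvCatStep
  split
  · rw [hne]; rfl
  · split
    · split
      · rfl
      · rw [hlt, Bool.false_and, if_neg (by simp)]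
    · rfl

theorem pvCatF_frozen (lines : List String) (c : Bool) (cat : List String)
    (h : cat.length = 4) :
    (pvCatF lines (c, cat)).2 = cat := by
  induction lines generalizing c with
  | nil => simp [pvCatF]
  | cons line rest ih =>
    rw [pvCatF]
    show (pvCatF rest ((pvCatStep line c cat).1, (pvCatStep line c cat).2)).2 = cat
    rw [pvCatStep_frozen line c cat h]
    exact ih _

-- A's geo loop vs the break-free machine: same list, or a ≥6-long prefix
theorem pvGeo_rel (lines : List String) (g : Bool) (geo : List String) :
    ∃ t, (pvGeoF lines (g, geo)).2 = pvA_geoLoop lines g geo ++ t ∧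
      (t = [] ∨ 6 ≤ (pvA_geoLoop lines g geo).length) := by
  induction lines generalizing g geo with
  | nil => exact ⟨[], by simp [pvGeoF, pvA_geoLoop]⟩
  | cons line rest ih =>
    rw [pvGeoF, pvA_geoLoop]
    show ∃ t, (pvGeoF rest (pvGeoStep line g geo)).2 = _ ++ t ∧ _
    unfold pvGeoStep
    split
    · split <;> exact ih true _
    · split
      · split
        · exact ih false geo
        · split
          · split
            · rename_i hbrk
              obtain ⟨t, ht⟩ := pvGeoF_ext rest g (geo ++ [line])
              exact ⟨t, ht, Or.inr hbrk⟩
            · exact ih g (geo ++ [line])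
          · exact ih g geo
      · exact ih g geo

-- A's catalyst loop appends to `highlights` exactly what the break-free
-- machine appends to its buffer, given the state-correspondence invariants
theorem pvCat_rel (lines : List String) (inCat hAdded : Bool) (cnt : Nat)
    (hs cat : List String)
    (h1 : hAdded = true ↔ cat ≠ [])
    (h2 : hAdded = true → cat.length = cnt + 1)
    (h3 : inCat = true → hAdded = true)
    (h4 : hAdded = false → cnt = 0)
    (h5 : cnt ≤ 2) :
    ∃ t, (pvCatF lines (inCat, cat)).2 = cat ++ t ∧
      pvA_catLoop lines inCat hAdded cnt hs = hs ++ t := by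
  induction lines generalizing inCat hAdded cnt hs cat with
  | nil => exact ⟨[], by simp [pvCatF], by simp [pvA_catLoop]⟩
  | cons line rest ih =>
    rw [pvCatF, pvA_catLoop, pvA_catTrig_eq]
    show ∃ t, (pvCatF rest (pvCatStep line inCat cat)).2 = cat ++ t ∧ _
    unfold pvCatStep
    split
    · -- catalyst trigger line
      cases hAdded with
      | true =>
        have hce : (cat == []) = false := by
          have hne := h1.mp rfl
          cases cat with
          | nil => exact absurd rfl hne
          | cons a l => rfl
        rw [hce, if_neg (by simp), if_pos rfl]
        exact ih true true cnt hs cat h1 h2 (fun _ => rfl) (fun h => nomatch h) h5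
      | false =>
        have hcat : cat = [] := by
          by_contra hc
          exact absurd (h1.mpr hc) (by simp)
        have hcnt : cnt = 0 := h4 rfl
        subst hcat hcnt
        rw [if_pos (by rfl : (([] : List String) == []) = true), if_neg (by simp : ¬ (false = true))]
        obtain ⟨t, ht1, ht2⟩ :=
          ih true true 0 (hs ++ ["\n**Growth Catalysts:**"]) ["\n**Growth Catalysts:**"]
            (by simp) (by simp) (fun _ => rfl) (fun h => nomatch h) (by omega)
        exact ⟨"\n**Growth Catalysts:**" :: t, by simpa using ht1, by simpa using ht2⟩
    · cases inCat with
      | true =>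
        rw [if_pos rfl, if_pos rfl]
        have hA : hAdded = true := h3 rfl
        subst hA
        have hlen : cat.length = cnt + 1 := h2 rfl
        split
        · exact ih false true cnt hs cat h1 h2 (fun h => nomatch h) h4 h5
        · have hlt : (decide (cat.length < 4)) = true := by
            simp only [decide_eq_true_eq, hlen]; omega
          rw [hlt, Bool.true_and]
          split
          · split
            · rename_i hb hbrk
              refine ⟨[PySem.Str.slice (PySem.Str.strip line) none (some 150)], ?_, rfl⟩
              exact pvCatF_frozen rest true _ (by simp [hlen]; omega)
            · rename_i hb hnbrk
              obtain ⟨t, ht1, ht2⟩ :=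
                ih true true (cnt + 1)
                  (hs ++ [PySem.Str.slice (PySem.Str.strip line) none (some 150)])
                  (cat ++ [PySem.Str.slice (PySem.Str.strip line) none (some 150)])
                  (by simp) (by simp [hlen]) (fun _ => rfl) (fun h => nomatch h) (by omega)
              exact ⟨PySem.Str.slice (PySem.Str.strip line) none (some 150) :: t,
                by simpa using ht1, by simpa using ht2⟩
          · exact ih true true cnt hs cat h1 h2 (fun _ => rfl) h4 h5
      | false =>
        rw [if_neg (by simp), if_neg (by simp)]
        exact ih false hAdded cnt hs cat h1 h2 (fun h => nomatch h) h4 h5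

-- consequences used by the main proof
theorem pvGeo_empty_iff (lines : List String) :
    (pvA_geoLoop lines false [] == []) = ((pvGeoF lines (false, [])).2 == []) := by
  obtain ⟨t, ht, hc⟩ := pvGeo_rel lines false []
  rw [ht]
  cases hg : pvA_geoLoop lines false [] with
  | nil =>
    rcases hc with h | h
    · simp [h]
    · rw [hg] at h; simp at h
  | cons a l => simp

theorem pvGeo_take_eq (lines : List String) :
    PySem.List.slice (pvA_geoLoop lines false []) none (some 6) =
      PySem.List.slice (pvGeoF lines (false, [])).2 none (some 6) := by
  obtain ⟨t, ht, hc⟩ := pvGeo_rel lines false []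
  rw [ht, PySem.List.slice_to _ (by omega), PySem.List.slice_to _ (by omega)]
  rcases hc with h | h
  · simp [h]
  · rw [List.take_append_of_le_length]
    exact le_trans (by norm_num) h

-- ===== VERDICT (by name: the statement is the Claim_ definition above) =====
theorem extract_news_highlights_spec : Claim_equal_extract_news_highlights := by
  intro news_report max_chars _
  unfold Spec_extract_news_highlights extract_news_highlights extract_news_highlights_alt
  split
  · rfl
  · simp only [pvFold_split]
    obtain ⟨t, ht1, ht2⟩ :=
      pvCat_rel ((PySem.Str.split? news_report "\n").getD []) false false 0
        (if pvA_geoLoop ((PySem.Str.split? news_report "\n").getD []) false [] == [] then []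
         else ["**US/Geographic Revenue:**"] ++
           PySem.List.slice (pvA_geoLoop ((PySem.Str.split? news_report "\n").getD []) false [])
             none (some 6))
        [] (by simp) (by simp) (fun h => h) (fun _ => rfl) (by omega)
    rw [List.nil_append] at ht1
    rw [ht2, ht1, pvGeo_empty_iff, pvGeo_take_eq]
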